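-- pv_equiv track=rewrite | github.com/N1ck6/PocketConverter | converter.py | get_extensions
-- ===== SOURCE A (Python) =====
-- def get_extensions(extension):
--     # Get convert variants for each extension
--     ext = [['mp4', 'gif'], ['txt', 'pdf', 'docx'], ['jpg', 'jpeg', 'png', 'bmp', 'tiff', 'webp', 'ico'], ['jpg', 'png', 'webp', 'ico']]
--     for exts in ext:
--         if extension in exts:
--             if len(exts) == len(ext[2]):
--                 ext = ext[3]
--                 if extension in ext:
--                     ext.remove(extension)
--                 return ext
--             else:
--                 exts.remove(extension)
--                 if extension == 'gif':
--                     exts.append('pngs')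
--                     exts.append('png')
--                 if extension == 'mp4':
--                     exts.append('mp3')
--                 return exts
-- ===== SOURCE B (Python) =====
-- def get_extensions(extension):
--     # Direct lookup table: each known extension maps to its exact conversion list.
--     table = {
--         'mp4': ['gif', 'mp3'],
--         'gif': ['mp4', 'pngs', 'png'],
--         'txt': ['pdf', 'docx'],
--         'pdf': ['txt', 'docx'],
--         'docx': ['txt', 'pdf'],
--         'jpg': ['png', 'webp', 'ico'],
--         'jpeg': ['jpg', 'png', 'webp', 'ico'],
--         'png': ['jpg', 'webp', 'ico'],
--         'bmp': ['jpg', 'png', 'webp', 'ico'],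
--         'tiff': ['jpg', 'png', 'webp', 'ico'],
--         'webp': ['jpg', 'png', 'ico'],
--         'ico': ['jpg', 'png', 'webp'],
--     }
--     return table.get(extension)
-- ===== Notes on version B (the rewrite author's own statement) =====
-- stated objective: simpler
-- what changed: Replaces the scan over grouped extension lists with in-place remove/append mutation by a single precomputed dict literal mapping each extension directly to its output list, returned via dict.get.
import Mathlib
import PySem

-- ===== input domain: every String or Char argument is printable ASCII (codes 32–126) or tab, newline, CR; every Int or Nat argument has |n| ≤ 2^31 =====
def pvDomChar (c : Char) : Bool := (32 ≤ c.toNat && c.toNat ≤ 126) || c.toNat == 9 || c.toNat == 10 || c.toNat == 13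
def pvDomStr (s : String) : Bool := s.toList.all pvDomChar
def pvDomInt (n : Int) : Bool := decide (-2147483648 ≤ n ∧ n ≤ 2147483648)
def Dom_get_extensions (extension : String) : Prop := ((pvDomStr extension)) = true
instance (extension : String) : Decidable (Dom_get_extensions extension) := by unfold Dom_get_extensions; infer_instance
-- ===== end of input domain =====

-- B replaces A's scan-and-mutate over grouped extension lists by a direct dict-literal lookup (objective: simpler).
-- ===== PORT A =====
-- loop over the grouped lists; remove?/append mirror Python's list.remove/append
def getExtLoop (extension : String) (ext : List (List String)) (rest : List (List String)) : Option (List String) :=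
  match rest with
  | [] => none
  | exts :: rs =>
    if extension ∈ exts then
      if exts.length = (ext.getD 2 []).length then
        let e := ext.getD 3 []
        let e := if extension ∈ e then (PySem.List.remove? e extension).getD e else e
        some e
      else
        let exts := (PySem.List.remove? exts extension).getD exts
        let exts := if extension = "gif" then exts ++ ["pngs", "png"] else exts
        let exts := if extension = "mp4" then exts ++ ["mp3"] else exts
        some exts
    else getExtLoop extension ext rs

def get_extensions (extension : String) : Option (List String) :=
  let ext : List (List String) := [["mp4", "gif"], ["txt", "pdf", "docx"],
    ["jpg", "jpeg", "png", "bmp", "tiff", "webp", "ico"], ["jpg", "png", "webp", "ico"]]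
  getExtLoop extension ext ext


-- ===== PORT B =====
def get_extensions_alt (extension : String) : Option (List String) :=
  let table : PySem.Dict String (List String) := PySem.Dict.ofList [
    ("mp4", ["gif", "mp3"]),
    ("gif", ["mp4", "pngs", "png"]),
    ("txt", ["pdf", "docx"]),
    ("pdf", ["txt", "docx"]),
    ("docx", ["txt", "pdf"]),
    ("jpg", ["png", "webp", "ico"]),
    ("jpeg", ["jpg", "png", "webp", "ico"]),
    ("png", ["jpg", "webp", "ico"]),
    ("bmp", ["jpg", "png", "webp", "ico"]),
    ("tiff", ["jpg", "png", "webp", "ico"]),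
    ("webp", ["jpg", "png", "ico"]),
    ("ico", ["jpg", "png", "webp"])]
  table.get? extension


-- ===== PRECONDITION & SPEC =====
def Spec_get_extensions (extension : String) (out : Option (List String)) : Prop := out = get_extensions_alt extension
instance (extension : String) (out : Option (List String)) : Decidable (Spec_get_extensions extension out) := by unfold Spec_get_extensions; infer_instance

-- ===== CLAIM (what is proved, stated in full; the proofs are below) =====
def Claim_equal_get_extensions : Prop := ∀ (extension : String), Dom_get_extensions extension → Spec_get_extensions extension (get_extensions extension)

-- ===== LEMMAS AND PROOFS =====

-- ===== VERDICT (by name: the statement is the Claim_ definition above) =====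
theorem get_extensions_spec : Claim_equal_get_extensions := by
  intro extension _
  unfold Spec_get_extensions
  by_cases h1 : extension = "mp4";  · subst h1; decide
  by_cases h2 : extension = "gif";  · subst h2; decide
  by_cases h3 : extension = "txt";  · subst h3; decide
  by_cases h4 : extension = "pdf";  · subst h4; decide
  by_cases h5 : extension = "docx"; · subst h5; decide
  by_cases h6 : extension = "jpg";  · subst h6; decide
  by_cases h7 : extension = "jpeg"; · subst h7; decide
  by_cases h8 : extension = "png";  · subst h8; decide
  by_cases h9 : extension = "bmp";  · subst h9; decide
  by_cases h10 : extension = "tiff"; · subst h10; decide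
  by_cases h11 : extension = "webp"; · subst h11; decide
  by_cases h12 : extension = "ico";  · subst h12; decide
  simp [get_extensions, get_extensions_alt, getExtLoop, PySem.Dict.get?, PySem.Dict.ofList,
    h1, h2, h3, h4, h5, h6, h7, h8, h9, h10, h11, h12]
  intro a b hab
  simp [PySem.Dict.update, PySem.Dict.insert, PySem.Dict.empty,
    PySem.Dict.contains] at hab
  rcases hab with ⟨rfl, -⟩ | ⟨rfl, -⟩ | ⟨rfl, -⟩ | ⟨rfl, -⟩ | ⟨rfl, -⟩ | ⟨rfl, -⟩ |
    ⟨rfl, -⟩ | ⟨rfl, -⟩ | ⟨rfl, -⟩ | ⟨rfl, -⟩ | ⟨rfl, -⟩ | ⟨rfl, -⟩ <;>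
    intro h <;>
    first
      | exact h1 h.symm | exact h2 h.symm | exact h3 h.symm | exact h4 h.symm
      | exact h5 h.symm | exact h6 h.symm | exact h7 h.symm | exact h8 h.symm
      | exact h9 h.symm | exact h10 h.symm | exact h11 h.symm | exact h12 h.symm
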